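-- pv_equiv track=rewrite | github.com/ryan-reid/BT-BKDiff | scripts/legacy/extract_class_skills_v3.py | get_missile_dam
-- ===== SOURCE A (Python) =====
-- def get_missile_dam(m, lvl, prefix):
--     try:
--         base = int(m.get(prefix, '0') or '0')
--         p_root = prefix
--         if prefix.startswith('EMin'): p_root = 'MinE'
--         elif prefix.startswith('EMax'): p_root = 'MaxE'
--         elif prefix.startswith('MinDam'): p_root = 'Min'
--         elif prefix.startswith('MaxDam'): p_root = 'Max'
--         add = 0
--         for i in range(1, lvl):
--             if i < 8: add += int(m.get(f'{p_root}Lev1', '0') or '0')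
--             elif i < 16: add += int(m.get(f'{p_root}Lev2', '0') or '0')
--             elif i < 22: add += int(m.get(f'{p_root}Lev3', '0') or '0')
--             elif i < 28: add += int(m.get(f'{p_root}Lev4', '0') or '0')
--             else: add += int(m.get(f'{p_root}Lev5', '0') or '0')
--         return base + add
--     except: return 0
-- ===== SOURCE B (Python) =====
-- def get_missile_dam(m, lvl, prefix):
--     # Closed form: count the levels in each of the five buckets arithmetically
--     # and add count * bucket-value, instead of looping over every level.
--     def val(key):
--         try:
--             return int(m.get(key, '0') or '0')
--         except Exception:
--             return None
--     base = val(prefix)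
--     if base is None:
--         return 0
--     p_root = prefix
--     for p, r in (('EMin', 'MinE'), ('EMax', 'MaxE'), ('MinDam', 'Min'), ('MaxDam', 'Max')):
--         if prefix.startswith(p):
--             p_root = r
--             break
--     total = base
--     bounds = ((1, 8), (8, 16), (16, 22), (22, 28), (28, None))
--     for j, (lo, hi) in enumerate(bounds, 1):
--         cnt = max(0, (lvl if hi is None else min(lvl, hi)) - lo)
--         if cnt > 0:
--             v = val(f'{p_root}Lev{j}')
--             if v is None:
--                 return 0
--             total += cnt * v
--     return total
-- ===== Notes on version B (the rewrite author's own statement) =====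
-- stated objective: faster
-- what changed: Replaces the per-level loop (one dict lookup, parse and addition per level up to lvl-1) by an O(1) closed form: the number of levels in each of the five threshold buckets is computed arithmetically and count * bucket-value is added once per bucket.
import Mathlib
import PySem

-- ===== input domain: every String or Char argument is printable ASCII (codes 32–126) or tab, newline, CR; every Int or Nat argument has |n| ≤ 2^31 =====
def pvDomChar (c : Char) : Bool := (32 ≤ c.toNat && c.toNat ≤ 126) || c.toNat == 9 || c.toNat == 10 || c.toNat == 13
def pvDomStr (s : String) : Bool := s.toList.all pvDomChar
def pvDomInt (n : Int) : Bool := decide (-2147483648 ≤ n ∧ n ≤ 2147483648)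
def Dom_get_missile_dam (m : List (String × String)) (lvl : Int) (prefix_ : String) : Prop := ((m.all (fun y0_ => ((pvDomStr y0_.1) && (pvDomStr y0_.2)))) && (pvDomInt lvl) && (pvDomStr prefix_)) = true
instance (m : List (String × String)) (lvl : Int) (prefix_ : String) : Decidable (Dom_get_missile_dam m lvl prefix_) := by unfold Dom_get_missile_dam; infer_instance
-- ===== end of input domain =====

-- B replaces A's per-level loop by an O(1) closed form: it counts how many levels
-- fall in each of the five buckets arithmetically and adds count * bucket value.

-- int(m.get(k, '0') or '0'), as an Option (none = ValueError, caught by A's except)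
def pvVal (m : List (String × String)) (k : String) : Option Int :=
  let s := PySem.Dict.getD (PySem.Dict.mk m) k "0"
  PySem.Int.ofStr? (if s = "" then "0" else s)

-- ===== PORT A =====
-- body of A's for-loop: one level i, may raise ValueError (= none)
def pvStepA (v1 v2 v3 v4 v5 : Option Int) (acc : Option Int) (i : Int) : Option Int :=
  acc.bind fun a =>
    if i < 8 then v1.map (fun w => a + w)
    else if i < 16 then v2.map (fun w => a + w)
    else if i < 22 then v3.map (fun w => a + w)
    else if i < 28 then v4.map (fun w => a + w)
    else v5.map (fun w => a + w)

def get_missile_dam (m : List (String × String)) (lvl : Int) (prefix_ : String) : Int :=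
  match pvVal m prefix_ with
  | none => 0            -- except: return 0
  | some base =>
    let p_root :=
      if PySem.Str.startswith prefix_ "EMin" then "MinE"
      else if PySem.Str.startswith prefix_ "EMax" then "MaxE"
      else if PySem.Str.startswith prefix_ "MinDam" then "Min"
      else if PySem.Str.startswith prefix_ "MaxDam" then "Max"
      else prefix_
    match (PySem.List.pyRange 1 lvl 1).foldl
        (pvStepA (pvVal m (p_root ++ "Lev1")) (pvVal m (p_root ++ "Lev2"))
                 (pvVal m (p_root ++ "Lev3")) (pvVal m (p_root ++ "Lev4"))
                 (pvVal m (p_root ++ "Lev5"))) (some 0) with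
    | none => 0          -- except: return 0
    | some add => base + add

-- ===== PORT B =====
-- one bucket (lo, hi): add cnt * value if the bucket is touched (B's loop body)
def pvBstep (m : List (String × String)) (p_root : String) (lvl : Int)
    (j : Int) (lo : Int) (hi : Option Int) (tot : Option Int) : Option Int :=
  tot.bind fun t =>
    let cnt := max 0 ((match hi with | none => lvl | some h => min lvl h) - lo)
    if 0 < cnt then
      (pvVal m (p_root ++ "Lev" ++ PySem.Int.toStr j)).map (fun v => t + cnt * v)
    else some t

def get_missile_dam_alt (m : List (String × String)) (lvl : Int) (prefix_ : String) : Int :=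
  match pvVal m prefix_ with
  | none => 0
  | some base =>
    let p_root :=
      match [("EMin", "MinE"), ("EMax", "MaxE"), ("MinDam", "Min"), ("MaxDam", "Max")].find?
          (fun pr => PySem.Str.startswith prefix_ pr.1) with
      | some pr => pr.2
      | none => prefix_
    match (pvBstep m p_root lvl 5 28 none
          (pvBstep m p_root lvl 4 22 (some 28)
          (pvBstep m p_root lvl 3 16 (some 22)
          (pvBstep m p_root lvl 2 8 (some 16)
          (pvBstep m p_root lvl 1 1 (some 8) (some base)))))) with
    | none => 0          -- a touched bucket's value fails to parse
    | some t => t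

-- ===== PRECONDITION & SPEC =====
def Spec_get_missile_dam (m : List (String × String)) (lvl : Int) (prefix_ : String) (out : Int) : Prop := out = get_missile_dam_alt m lvl prefix_
instance (m : List (String × String)) (lvl : Int) (prefix_ : String) (out : Int) : Decidable (Spec_get_missile_dam m lvl prefix_ out) := by unfold Spec_get_missile_dam; infer_instance

-- ===== CLAIM (what is proved, stated in full; the proofs are below) =====
def Claim_equal_get_missile_dam : Prop := ∀ (m : List (String × String)) (lvl : Int) (prefix_ : String), Dom_get_missile_dam m lvl prefix_ → Spec_get_missile_dam m lvl prefix_ (get_missile_dam m lvl prefix_)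

-- ===== LEMMAS AND PROOFS =====

-- A's loop as a function of the five bucket values
def pvF (v1 v2 v3 v4 v5 : Option Int) (lvl : Int) (c : Int) : Option Int :=
  (PySem.List.pyRange 1 lvl 1).foldl (pvStepA v1 v2 v3 v4 v5) (some c)

-- abstract single bucket step (pvBstep with the looked-up value abstracted)
def pvB1 (lvl lo : Int) (hi : Option Int) (v : Option Int) (tot : Option Int) : Option Int :=
  tot.bind fun t =>
    let cnt := max 0 ((match hi with | none => lvl | some h => min lvl h) - lo)
    if 0 < cnt then v.map (fun w => t + cnt * w) else some t

def pvG (v1 v2 v3 v4 v5 : Option Int) (lvl : Int) (c : Int) : Option Int :=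
  pvB1 lvl 28 none v5 (pvB1 lvl 22 (some 28) v4 (pvB1 lvl 16 (some 22) v3
    (pvB1 lvl 8 (some 16) v2 (pvB1 lvl 1 (some 8) v1 (some c)))))

def pvAdd (v acc : Option Int) : Option Int := acc.bind fun a => v.map (fun w => a + w)

theorem pvB1_comm (lvl lo : Int) (hi : Option Int) (v' v acc : Option Int) :
    pvB1 lvl lo hi v' (pvAdd v acc) = pvAdd v (pvB1 lvl lo hi v' acc) := by
  rcases acc with _ | a <;> rcases v with _ | w <;> rcases v' with _ | w' <;>
    simp [pvB1, pvAdd] <;> split_ifs <;> simp <;> ring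

theorem pvB1_out (k lo : Int) (hi : Option Int) (v acc : Option Int)
    (h : k < lo ∨ ∃ h', hi = some h' ∧ h' ≤ k) :
    pvB1 (k + 1) lo hi v acc = pvB1 k lo hi v acc := by
  rcases hi with _ | h'
  · have hc : max 0 (k + 1 - lo) = max 0 (k - lo) := by
      rcases h with h | ⟨h'', e, hh⟩
      · omega
      · cases e
    simp only [pvB1, hc]
  · have hc : max 0 (min (k + 1) h' - lo) = max 0 (min k h' - lo) := by
      rcases h with h | ⟨h'', e, hh⟩
      · omega
      · cases e; omega
    simp only [pvB1, hc]

theorem pvCnt_step (c t : Int) (v : Option Int) (hc : 0 ≤ c) :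
    (if 0 < c + 1 then v.map (fun w => t + (c + 1) * w) else some t)
      = pvAdd v (if 0 < c then v.map (fun w => t + c * w) else some t) := by
  have h1 : (0:Int) < c + 1 := by omega
  rcases v with _ | w
  · by_cases h0 : 0 < c <;> simp [pvAdd, h1, h0]
  · by_cases h0 : 0 < c
    · simp [pvAdd, h1, h0]; ring
    · have e : c = 0 := by omega
      subst e
      have e2 : t + (0 + 1) * w = t + w := by ring
      simp [pvAdd, h1, e2]

theorem pvB1_in (k lo : Int) (hi : Option Int) (v acc : Option Int)
    (hlo : lo ≤ k) (hhi : ∀ h', hi = some h' → k < h') :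
    pvB1 (k + 1) lo hi v acc = pvAdd v (pvB1 k lo hi v acc) := by
  rcases hi with _ | h'
  · have e1 : max 0 (k + 1 - lo) = max 0 (k - lo) + 1 := by omega
    rcases acc with _ | t
    · rfl
    · show (if 0 < max 0 (k + 1 - lo) then v.map (fun w => t + max 0 (k + 1 - lo) * w) else some t)
        = pvAdd v (if 0 < max 0 (k - lo) then v.map (fun w => t + max 0 (k - lo) * w) else some t)
      rw [e1, pvCnt_step _ _ _ (by omega)]
  · have hk' := hhi h' rfl
    have e1 : max 0 (min (k + 1) h' - lo) = max 0 (min k h' - lo) + 1 := by omega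
    rcases acc with _ | t
    · rfl
    · show (if 0 < max 0 (min (k + 1) h' - lo) then v.map (fun w => t + max 0 (min (k + 1) h' - lo) * w) else some t)
        = pvAdd v (if 0 < max 0 (min k h' - lo) then v.map (fun w => t + max 0 (min k h' - lo) * w) else some t)
      rw [e1, pvCnt_step _ _ _ (by omega)]

theorem pvG_succ (v1 v2 v3 v4 v5 : Option Int) (k : Int) (hk : 1 ≤ k) (c : Int) :
    pvG v1 v2 v3 v4 v5 (k + 1) c =
      pvStepA v1 v2 v3 v4 v5 (pvG v1 v2 v3 v4 v5 k c) k := by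
  have step : pvStepA v1 v2 v3 v4 v5 (pvG v1 v2 v3 v4 v5 k c) k =
      pvAdd (if k < 8 then v1 else if k < 16 then v2 else if k < 22 then v3
             else if k < 28 then v4 else v5) (pvG v1 v2 v3 v4 v5 k c) := by
    simp only [pvStepA, pvAdd]
    split_ifs <;> rfl
  rw [step]
  unfold pvG
  by_cases h8 : k < 8
  · rw [pvB1_out k 28 none v5 _ (Or.inl (by omega)),
        pvB1_out k 22 (some 28) v4 _ (Or.inl (by omega)),
        pvB1_out k 16 (some 22) v3 _ (Or.inl (by omega)),
        pvB1_out k 8 (some 16) v2 _ (Or.inl (by omega)),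
        pvB1_in k 1 (some 8) v1 _ (by omega) (fun h' e => by cases e; omega)]
    simp [h8, pvB1_comm]
  · by_cases h16 : k < 16
    · rw [pvB1_out k 28 none v5 _ (Or.inl (by omega)),
          pvB1_out k 22 (some 28) v4 _ (Or.inl (by omega)),
          pvB1_out k 16 (some 22) v3 _ (Or.inl (by omega)),
          pvB1_in k 8 (some 16) v2 _ (by omega) (fun h' e => by cases e; omega),
          pvB1_out k 1 (some 8) v1 _ (Or.inr ⟨8, rfl, by omega⟩)]
      simp [h8, h16, pvB1_comm]
    · by_cases h22 : k < 22
      · rw [pvB1_out k 28 none v5 _ (Or.inl (by omega)),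
            pvB1_out k 22 (some 28) v4 _ (Or.inl (by omega)),
            pvB1_in k 16 (some 22) v3 _ (by omega) (fun h' e => by cases e; omega),
            pvB1_out k 8 (some 16) v2 _ (Or.inr ⟨16, rfl, by omega⟩),
            pvB1_out k 1 (some 8) v1 _ (Or.inr ⟨8, rfl, by omega⟩)]
        simp [h8, h16, h22, pvB1_comm]
      · by_cases h28 : k < 28
        · rw [pvB1_out k 28 none v5 _ (Or.inl (by omega)),
              pvB1_in k 22 (some 28) v4 _ (by omega) (fun h' e => by cases e; omega),
              pvB1_out k 16 (some 22) v3 _ (Or.inr ⟨22, rfl, by omega⟩),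
              pvB1_out k 8 (some 16) v2 _ (Or.inr ⟨16, rfl, by omega⟩),
              pvB1_out k 1 (some 8) v1 _ (Or.inr ⟨8, rfl, by omega⟩)]
          simp [h8, h16, h22, h28, pvB1_comm]
        · rw [pvB1_in k 28 none v5 _ (by omega) (fun h' e => by cases e),
              pvB1_out k 22 (some 28) v4 _ (Or.inr ⟨28, rfl, by omega⟩),
              pvB1_out k 16 (some 22) v3 _ (Or.inr ⟨22, rfl, by omega⟩),
              pvB1_out k 8 (some 16) v2 _ (Or.inr ⟨16, rfl, by omega⟩),
              pvB1_out k 1 (some 8) v1 _ (Or.inr ⟨8, rfl, by omega⟩)]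
          simp [h8, h16, h22, h28]

theorem pvG_base (v1 v2 v3 v4 v5 : Option Int) (lvl : Int) (h : lvl ≤ 1) (c : Int) :
    pvG v1 v2 v3 v4 v5 lvl c = some c := by
  have e : ∀ (lo : Int) (hi : Option Int) v, 1 ≤ lo →
      pvB1 lvl lo hi v (some c) = some c := by
    intro lo hi v hlo
    rcases hi with _ | h' <;> simp [pvB1] <;> omega
  unfold pvG
  rw [e 1 _ _ (by omega), e 8 _ _ (by omega), e 16 _ _ (by omega),
      e 22 _ _ (by omega), e 28 _ _ (by omega)]

theorem pvF_succ (v1 v2 v3 v4 v5 : Option Int) (k : Int) (hk : 1 ≤ k) (c : Int) :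
    pvF v1 v2 v3 v4 v5 (k + 1) c =
      pvStepA v1 v2 v3 v4 v5 (pvF v1 v2 v3 v4 v5 k c) k := by
  unfold pvF
  rw [PySem.List.pyRange_one_succ_right hk, List.foldl_append]
  rfl

theorem pvF_eq_pvG (v1 v2 v3 v4 v5 : Option Int) (lvl : Int) (c : Int) :
    pvF v1 v2 v3 v4 v5 lvl c = pvG v1 v2 v3 v4 v5 lvl c := by
  by_cases h : lvl ≤ 1
  · rw [pvG_base _ _ _ _ _ _ h]
    unfold pvF
    rw [PySem.List.pyRange_one_eq_nil h]
    rfl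
  · push_neg at h
    obtain ⟨n, hn⟩ : ∃ n : Nat, lvl = 1 + n := ⟨(lvl - 1).toNat, by omega⟩
    subst hn
    clear h
    induction n with
    | zero =>
      rw [pvG_base _ _ _ _ _ _ (by omega)]
      unfold pvF
      rw [PySem.List.pyRange_one_eq_nil (by omega)]
      rfl
    | succ n ih =>
      have e : (1 : Int) + (n + 1 : Nat) = (1 + (n : Int)) + 1 := by push_cast; ring
      rw [e, pvF_succ _ _ _ _ _ _ (by omega), pvG_succ _ _ _ _ _ _ (by omega), ih]

theorem pvAdd_shift (v : Option Int) (acc : Option Int) (b : Int) :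
    pvAdd v (acc.map (fun a => b + a)) = (pvAdd v acc).map (fun a => b + a) := by
  rcases acc with _ | a <;> rcases v with _ | w <;> simp [pvAdd] <;> ring

theorem pvF_shift (v1 v2 v3 v4 v5 : Option Int) (lvl : Int) (b : Int) :
    pvF v1 v2 v3 v4 v5 lvl b = (pvF v1 v2 v3 v4 v5 lvl 0).map (fun a => b + a) := by
  by_cases h : lvl ≤ 1
  · unfold pvF
    rw [PySem.List.pyRange_one_eq_nil h]
    simp
  · push_neg at h
    obtain ⟨n, hn⟩ : ∃ n : Nat, lvl = 1 + n := ⟨(lvl - 1).toNat, by omega⟩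
    subst hn
    clear h
    induction n with
    | zero =>
      unfold pvF
      rw [PySem.List.pyRange_one_eq_nil (by omega)]
      simp
    | succ n ih =>
      have e : (1 : Int) + (n + 1 : Nat) = (1 + (n : Int)) + 1 := by push_cast; ring
      have step : ∀ acc k, pvStepA v1 v2 v3 v4 v5 acc k =
          pvAdd (if k < 8 then v1 else if k < 16 then v2 else if k < 22 then v3
                 else if k < 28 then v4 else v5) acc := by
        intro acc k
        simp only [pvStepA, pvAdd]
        split_ifs <;> rfl
      rw [e, pvF_succ _ _ _ _ _ _ (by omega), pvF_succ _ _ _ _ _ _ (by omega),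
          ih, step, step, pvAdd_shift]

theorem pvRoot_eq (prefix_ : String) :
    (match [("EMin", "MinE"), ("EMax", "MaxE"), ("MinDam", "Min"), ("MaxDam", "Max")].find?
        (fun pr => PySem.Str.startswith prefix_ pr.1) with
     | some pr => pr.2
     | none => prefix_) =
    (if PySem.Str.startswith prefix_ "EMin" then "MinE"
     else if PySem.Str.startswith prefix_ "EMax" then "MaxE"
     else if PySem.Str.startswith prefix_ "MinDam" then "Min"
     else if PySem.Str.startswith prefix_ "MaxDam" then "Max"
     else prefix_) := by
  simp only [List.find?]
  cases h1 : PySem.Str.startswith prefix_ "EMin" <;>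
    cases h2 : PySem.Str.startswith prefix_ "EMax" <;>
      cases h3 : PySem.Str.startswith prefix_ "MinDam" <;>
        cases h4 : PySem.Str.startswith prefix_ "MaxDam" <;> simp [h1, h2, h3, h4]

-- ===== VERDICT (by name: the statement is the Claim_ definition above) =====
theorem get_missile_dam_spec : Claim_equal_get_missile_dam := by
  intro m lvl prefix_ _
  unfold Spec_get_missile_dam
  unfold get_missile_dam get_missile_dam_alt
  rcases hb : pvVal m prefix_ with _ | base
  · rfl
  · simp only [pvRoot_eq]
    set r := (if PySem.Str.startswith prefix_ "EMin" then "MinE"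
     else if PySem.Str.startswith prefix_ "EMax" then "MaxE"
     else if PySem.Str.startswith prefix_ "MinDam" then "Min"
     else if PySem.Str.startswith prefix_ "MaxDam" then "Max"
     else prefix_) with hr
    have k1 : r ++ "Lev" ++ PySem.Int.toStr 1 = r ++ "Lev1" := by
      rw [String.append_assoc]; rfl
    have k2 : r ++ "Lev" ++ PySem.Int.toStr 2 = r ++ "Lev2" := by
      rw [String.append_assoc]; rfl
    have k3 : r ++ "Lev" ++ PySem.Int.toStr 3 = r ++ "Lev3" := by
      rw [String.append_assoc]; rfl
    have k4 : r ++ "Lev" ++ PySem.Int.toStr 4 = r ++ "Lev4" := by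
      rw [String.append_assoc]; rfl
    have k5 : r ++ "Lev" ++ PySem.Int.toStr 5 = r ++ "Lev5" := by
      rw [String.append_assoc]; rfl
    have hB : ∀ j lo hi acc, pvBstep m r lvl j lo hi acc =
        pvB1 lvl lo hi (pvVal m (r ++ "Lev" ++ PySem.Int.toStr j)) acc := by
      intro j lo hi acc; rfl
    simp only [hB, k1, k2, k3, k4, k5]
    have main := pvF_eq_pvG (pvVal m (r ++ "Lev1")) (pvVal m (r ++ "Lev2"))
      (pvVal m (r ++ "Lev3")) (pvVal m (r ++ "Lev4")) (pvVal m (r ++ "Lev5")) lvl base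
    have shift := pvF_shift (pvVal m (r ++ "Lev1")) (pvVal m (r ++ "Lev2"))
      (pvVal m (r ++ "Lev3")) (pvVal m (r ++ "Lev4")) (pvVal m (r ++ "Lev5")) lvl base
    change (match pvF (pvVal m (r ++ "Lev1")) (pvVal m (r ++ "Lev2"))
      (pvVal m (r ++ "Lev3")) (pvVal m (r ++ "Lev4")) (pvVal m (r ++ "Lev5")) lvl 0 with
      | none => 0 | some add => base + add) =
      (match pvG (pvVal m (r ++ "Lev1")) (pvVal m (r ++ "Lev2"))
      (pvVal m (r ++ "Lev3")) (pvVal m (r ++ "Lev4")) (pvVal m (r ++ "Lev5")) lvl base with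
      | none => 0 | some t => t)
    rw [← main, shift]
    rcases pvF (pvVal m (r ++ "Lev1")) (pvVal m (r ++ "Lev2"))
      (pvVal m (r ++ "Lev3")) (pvVal m (r ++ "Lev4")) (pvVal m (r ++ "Lev5")) lvl 0 with _ | a
    · rfl
    · rfl
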